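-- pv_equiv track=rewrite | github.com/acetil/adventofcode | 2021/day21.py | quantumAlgo
-- ===== SOURCE A (Python) =====
-- def quantumAlgo (p1score, p2score, p1pos, p2pos, memoised):
--     if p1score >= 21:
--         return (1, 0)
--     elif p2score >= 21:
--         return (0, 1)
--
--     if memoised[p1score][p2score][p1pos][p2pos] is not None:
--         return memoised[p1score][p2score][p1pos][p2pos]
--
--     moves = [(3, 1), (4, 3), (5, 6), (6, 7), (7, 6), (8, 3), (9, 1)]
--
--     result = (0, 0)
--
--     for i in moves:
--         pos = (p1pos + i[0]) % 10
--         score = p1score + pos + 1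
--
--         x = quantumAlgo(p2score, score, p2pos, pos, memoised)
--
--         result = (result[0] + x[1] * i[1], result[1] + x[0] * i[1])
--
--     memoised[p1score][p2score][p1pos][p2pos] = result
--
--     return result
-- ===== SOURCE B (Python) =====
-- def quantumAlgo(p1score, p2score, p1pos, p2pos, memoised):
--     # bottom-up DP over decreasing score totals instead of memoized recursion
--     # (memoised accepted for interface compatibility; the table is not consulted)
--     if p1score >= 21:
--         return (1, 0)
--     if p2score >= 21:
--         return (0, 1)
--     moves = [(3, 1), (4, 3), (5, 6), (6, 7), (7, 6), (8, 3), (9, 1)]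
--     wins = {}
--     for total in range(40, -1, -1):
--         for s1 in range(max(0, total - 20), min(total, 20) + 1):
--             s2 = total - s1
--             for q1 in range(10):
--                 for q2 in range(10):
--                     w1 = 0
--                     w2 = 0
--                     for d, c in moves:
--                         pos = (q1 + d) % 10
--                         sc = s1 + pos + 1
--                         if sc >= 21:
--                             w1 = w1 + c
--                         else:
--                             x = wins[(s2, sc, q2, pos)]
--                             w1 = w1 + x[1] * c
--                             w2 = w2 + x[0] * c
--                     wins[(s1, s2, q1, q2)] = (w1, w2)
--     return wins[(p1score, p2score, p1pos, p2pos)]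
-- ===== Notes on version B (the rewrite author's own statement) =====
-- stated objective: alternative
-- what changed: Replaces A's top-down memoized recursion (which threads and mutates the memo table) by an iterative bottom-up DP that fills a dict of all (s1,s2,q1,q2) states in decreasing score-total order and reads off the answer; B never consults or mutates the memoised argument.
-- outside the precondition, e.g. on quantumAlgo(0, 0, 0, 0, [[[[(5, 7)]]]]): A returns (5, 7), B returns (32491093007709, 22118321045850); on quantumAlgo(-1, 0, 0, 0, [[[[(2, 3)]]]]): A returns (2, 3), B raises KeyError
import Mathlib
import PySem

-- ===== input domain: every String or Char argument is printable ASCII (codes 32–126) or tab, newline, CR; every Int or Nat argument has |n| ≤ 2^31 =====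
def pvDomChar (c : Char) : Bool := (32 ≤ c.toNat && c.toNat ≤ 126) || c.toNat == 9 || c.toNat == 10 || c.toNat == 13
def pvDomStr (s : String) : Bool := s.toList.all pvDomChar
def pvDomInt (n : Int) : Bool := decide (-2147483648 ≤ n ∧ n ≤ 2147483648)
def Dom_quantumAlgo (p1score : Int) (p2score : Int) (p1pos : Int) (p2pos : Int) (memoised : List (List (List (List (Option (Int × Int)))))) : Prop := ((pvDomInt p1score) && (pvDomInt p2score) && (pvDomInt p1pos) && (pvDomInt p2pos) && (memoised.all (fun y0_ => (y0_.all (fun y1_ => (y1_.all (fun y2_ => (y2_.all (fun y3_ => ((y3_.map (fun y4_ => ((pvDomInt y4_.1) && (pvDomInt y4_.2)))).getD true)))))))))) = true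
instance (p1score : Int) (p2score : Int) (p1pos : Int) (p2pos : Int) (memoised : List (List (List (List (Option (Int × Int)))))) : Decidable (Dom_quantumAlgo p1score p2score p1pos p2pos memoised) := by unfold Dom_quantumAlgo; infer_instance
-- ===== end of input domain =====

-- B replaces A's top-down memoized recursion by a bottom-up DP table filled in decreasing
-- score-total order (objective: alternative decomposition, same asymptotic cost).
-- Note: Python A mutates `memoised` in place; B does not — the equivalence proved here is
-- about the RETURN value only.

-- the quantum-die outcome distribution (shared literal of both Python sources)
def pvMoves : List (Int × Int) := [(3, 1), (4, 3), (5, 6), (6, 7), (7, 6), (8, 3), (9, 1)]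

-- ===== PORT A =====
-- memoised[a][b][c][d], chained getitem: none = IndexError (excluded by Pre_)
def pvLookup4 (T : List (List (List (List (Option (Int × Int)))))) (a b c d : Int) :
    Option (Option (Int × Int)) :=
  match PySem.List.pyGet? T a with
  | none => none
  | some r =>
    match PySem.List.pyGet? r b with
    | none => none
    | some r2 =>
      match PySem.List.pyGet? r2 c with
      | none => none
      | some r3 => PySem.List.pyGet? r3 d

-- in-place update of row i (exact for in-range indices, incl. negative wraparound;
-- out of range Python raises IndexError — those inputs are excluded by Pre_)
def pvModify {α : Type} (i : Int) (f : α → α) (xs : List α) : List α :=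
  if 0 ≤ i then xs.modify i.toNat f else xs.modify (xs.length + i).toNat f

-- memoised[a][b][c][d] = v
def pvSet4 (T : List (List (List (List (Option (Int × Int)))))) (a b c d : Int) (v : Int × Int) :
    List (List (List (List (Option (Int × Int))))) :=
  pvModify a (fun r => pvModify b (fun r2 => pvModify c (fun r3 => PySem.List.pySetD r3 d (some v)) r2) r) T

theorem pvMod10_bounds (a : Int) : 0 ≤ PySem.Int.mod a 10 ∧ PySem.Int.mod a 10 < 10 := by
  rw [PySem.Int.mod_eq_emod_of_pos (by norm_num)]
  exact ⟨Int.emod_nonneg _ (by norm_num), Int.emod_lt_of_pos _ (by norm_num)⟩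

mutual
-- the recursive function; the memo table is threaded as explicit state (Python mutates it)
def quantumAlgoRec (p1score p2score p1pos p2pos : Int)
    (memoised : List (List (List (List (Option (Int × Int)))))) :
    (Int × Int) × List (List (List (List (Option (Int × Int))))) :=
  if h1 : 21 ≤ p1score then ((1, 0), memoised)
  else if h2 : 21 ≤ p2score then ((0, 1), memoised)
  else
    match pvLookup4 memoised p1score p2score p1pos p2pos with
    | some (some v) => (v, memoised)
    | _ =>          -- entry is None (or IndexError, excluded by Pre_): run the loop
      let r := quantumAlgoGo p1score p2score p1pos p2pos (by omega) pvMoves (0, 0) memoised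
      (r.1, pvSet4 r.2 p1score p2score p1pos p2pos r.1)
termination_by ((42 - p1score - p2score).toNat, 8)
decreasing_by
  apply Prod.Lex.right' <;> simp [pvMoves]

-- the 'for i in moves' loop, threading result and the memo table
def quantumAlgoGo (p1score p2score p1pos p2pos : Int) (h : p1score < 21 ∧ p2score < 21)
    (moves : List (Int × Int)) (result : Int × Int)
    (memoised : List (List (List (List (Option (Int × Int)))))) :
    (Int × Int) × List (List (List (List (Option (Int × Int))))) :=
  match moves with
  | [] => (result, memoised)
  | i :: rest =>
    let pos := PySem.Int.mod (p1pos + i.1) 10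
    let score := p1score + pos + 1
    let x := quantumAlgoRec p2score score p2pos pos memoised
    quantumAlgoGo p1score p2score p1pos p2pos h rest
      (result.1 + x.1.2 * i.2, result.2 + x.1.1 * i.2) x.2
termination_by ((42 - p1score - p2score).toNat, moves.length)
decreasing_by
  · apply Prod.Lex.left
    have := pvMod10_bounds (p1pos + i.1)
    omega
  · apply Prod.Lex.right'
    · omega
    · simp
end

def quantumAlgo (p1score : Int) (p2score : Int) (p1pos : Int) (p2pos : Int) (memoised : List (List (List (List (Option (Int × Int)))))) : Int × Int :=
  (quantumAlgoRec p1score p2score p1pos p2pos memoised).1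

-- ===== PORT B =====
-- bottom-up DP: wins[(s1,s2,q1,q2)] filled for totals 40 down to 0.
-- wins[(s2,sc,q2,pos)] / the final wins[...] are always present on Pre_ (proved below);
-- the .getD (0,0) is the junk value of a KeyError Python would raise outside Pre_.
def quantumAlgo_alt (p1score : Int) (p2score : Int) (p1pos : Int) (p2pos : Int) (memoised : List (List (List (List (Option (Int × Int)))))) : Int × Int :=
  if 21 ≤ p1score then (1, 0)
  else if 21 ≤ p2score then (0, 1)
  else
    let wins :=
      (PySem.List.pyRange 40 (-1) (-1)).foldl (fun W total =>
        (PySem.List.pyRange (max 0 (total - 20)) (min total 20 + 1) 1).foldl (fun W s1 =>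
          let s2 := total - s1
          (PySem.List.pyRange 0 10 1).foldl (fun W q1 =>
            (PySem.List.pyRange 0 10 1).foldl (fun W q2 =>
              let w := pvMoves.foldl (fun (w : Int × Int) m =>
                let pos := PySem.Int.mod (q1 + m.1) 10
                let sc := s1 + pos + 1
                if 21 ≤ sc then (w.1 + m.2, w.2)
                else
                  let x := (W.get? (s2, sc, q2, pos)).getD (0, 0)
                  (w.1 + x.2 * m.2, w.2 + x.1 * m.2)) (0, 0)
              W.insert (s1, s2, q1, q2) w) W) W) W)
        (PySem.Dict.empty : PySem.Dict (Int × Int × Int × Int) (Int × Int))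
    (wins.get? (p1score, p2score, p1pos, p2pos)).getD (0, 0)

-- ===== PRECONDITION & SPEC =====
-- pure table lookup used only to state Pre_ (plain getElem?, no port code)
def pvTableGet (T : List (List (List (List (Option (Int × Int)))))) (i j k l : Nat) :
    Option (Option (Int × Int)) :=
  T[i]?.bind fun r => r[j]?.bind fun r2 => r2[k]?.bind fun r3 => r3[l]?

-- Pre_ excludes inputs where A raises IndexError (a table too small for the recursion), and
-- the accidental corners where A's value depends on the cache rather than the game: memo
-- tables pre-seeded with non-None entries (A returns whatever was cached) and negative
-- scores/positions (Python's negative-index wraparound reads unrelated cells). Inside Pre_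
-- the non-immediate case is the intended domain: in-range state, fresh all-None table
-- covering indices 21×21×10×10.
-- the table is a fresh 21×21×10×10 all-None memo (extra rows/columns beyond these indices are unused)
def pvFresh (T : List (List (List (List (Option (Int × Int)))))) : Bool :=
  (List.range 21).all fun i => (List.range 21).all fun j =>
    (List.range 10).all fun k => (List.range 10).all fun l =>
      pvTableGet T i j k l == some none

def Pre_quantumAlgo (p1score : Int) (p2score : Int) (p1pos : Int) (p2pos : Int) (memoised : List (List (List (List (Option (Int × Int)))))) : Prop :=
  21 ≤ p1score ∨ (p1score < 21 ∧ 21 ≤ p2score) ∨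
  (0 ≤ p1score ∧ p1score < 21 ∧ 0 ≤ p2score ∧ p2score < 21 ∧
   0 ≤ p1pos ∧ p1pos < 10 ∧ 0 ≤ p2pos ∧ p2pos < 10 ∧
   pvFresh memoised = true)
instance (p1score : Int) (p2score : Int) (p1pos : Int) (p2pos : Int) (memoised : List (List (List (List (Option (Int × Int)))))) : Decidable (Pre_quantumAlgo p1score p2score p1pos p2pos memoised) := by unfold Pre_quantumAlgo; infer_instance

def pvWitness_quantumAlgo : Int × Int × Int × Int × (List (List (List (List (Option (Int × Int)))))) :=
  (21, 0, 0, 0, [])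

def Spec_quantumAlgo (p1score : Int) (p2score : Int) (p1pos : Int) (p2pos : Int) (memoised : List (List (List (List (Option (Int × Int)))))) (out : Int × Int) : Prop := out = quantumAlgo_alt p1score p2score p1pos p2pos memoised
instance (p1score : Int) (p2score : Int) (p1pos : Int) (p2pos : Int) (memoised : List (List (List (List (Option (Int × Int)))))) (out : Int × Int) : Decidable (Spec_quantumAlgo p1score p2score p1pos p2pos memoised out) := by unfold Spec_quantumAlgo; infer_instance

-- ===== CLAIM (what is proved, stated in full; the proofs are below) =====
def Claim_equal_quantumAlgo : Prop := ∀ (p1score : Int) (p2score : Int) (p1pos : Int) (p2pos : Int) (memoised : List (List (List (List (Option (Int × Int)))))), Dom_quantumAlgo p1score p2score p1pos p2pos memoised → Pre_quantumAlgo p1score p2score p1pos p2pos memoised → Spec_quantumAlgo p1score p2score p1pos p2pos memoised (quantumAlgo p1score p2score p1pos p2pos memoised)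

-- ===== LEMMAS AND PROOFS =====

theorem pvWitness_ok : Dom_quantumAlgo pvWitness_quantumAlgo.1 pvWitness_quantumAlgo.2.1
    pvWitness_quantumAlgo.2.2.1 pvWitness_quantumAlgo.2.2.2.1 pvWitness_quantumAlgo.2.2.2.2 ∧
    Pre_quantumAlgo pvWitness_quantumAlgo.1 pvWitness_quantumAlgo.2.1
    pvWitness_quantumAlgo.2.2.1 pvWitness_quantumAlgo.2.2.2.1 pvWitness_quantumAlgo.2.2.2.2 := by
  decide

-- the mathematical value both implementations compute (proof-side specification)
mutual
def fSpec (s1 s2 q1 q2 : Int) : Int × Int :=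
  if h1 : 21 ≤ s1 then (1, 0)
  else if h2 : 21 ≤ s2 then (0, 1)
  else fGo s1 s2 q1 q2 (by omega) pvMoves (0, 0)
termination_by ((42 - s1 - s2).toNat, 8)
decreasing_by
  apply Prod.Lex.right' <;> simp [pvMoves]

def fGo (s1 s2 q1 q2 : Int) (h : s1 < 21 ∧ s2 < 21) (moves : List (Int × Int)) (acc : Int × Int) :
    Int × Int :=
  match moves with
  | [] => acc
  | i :: rest =>
    let pos := PySem.Int.mod (q1 + i.1) 10
    let sc := s1 + pos + 1
    let x := fSpec s2 sc q2 pos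
    fGo s1 s2 q1 q2 h rest (acc.1 + x.2 * i.2, acc.2 + x.1 * i.2)
termination_by ((42 - s1 - s2).toNat, moves.length)
decreasing_by
  · apply Prod.Lex.left
    have := pvMod10_bounds (q1 + i.1)
    omega
  · apply Prod.Lex.right'
    · omega
    · simp
end


-- ---------- A-side: the threaded memo table stays consistent with fSpec ----------

def pvGood (T : List (List (List (List (Option (Int × Int)))))) : Prop :=
  ∀ i j k l : Nat, i < 21 → j < 21 → k < 10 → l < 10 →
    ∃ o, pvTableGet T i j k l = some o ∧ (o = none ∨ o = some (fSpec i j k l))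

theorem pvLookup4_eq (T : List (List (List (List (Option (Int × Int)))))) {a b c d : Int}
    (ha : 0 ≤ a) (hb : 0 ≤ b) (hc : 0 ≤ c) (hd : 0 ≤ d) :
    pvLookup4 T a b c d = pvTableGet T a.toNat b.toNat c.toNat d.toNat := by
  unfold pvLookup4 pvTableGet
  rw [PySem.List.pyGet?_of_nonneg T ha]
  cases hA : T[a.toNat]? with
  | none => rfl
  | some r =>
    simp only [Option.bind_some]
    rw [PySem.List.pyGet?_of_nonneg r hb]
    cases hB : r[b.toNat]? with
    | none => rfl
    | some r2 =>
      simp only [Option.bind_some]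
      rw [PySem.List.pyGet?_of_nonneg r2 hc]
      cases hC : r2[c.toNat]? with
      | none => rfl
      | some r3 =>
        simp only [Option.bind_some]
        rw [PySem.List.pyGet?_of_nonneg r3 hd]

theorem pvModify_natCast {α : Type} (n : Nat) (f : α → α) (xs : List α) :
    pvModify (n : Int) f xs = xs.modify n f := by
  simp [pvModify]

theorem pvModify_getElem? {α : Type} (l : List α) (f : α → α) (i j : Nat) :
    (l.modify i f)[j]? = if i = j then f <$> l[j]? else l[j]? := by
  rw [List.getElem?_modify]
  by_cases h : i = j <;> cases l[j]? <;> simp [h]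

theorem pvTableGet_pvSet4 {T : List (List (List (List (Option (Int × Int)))))}
    {A B C D : Nat} {o : Option (Int × Int)}
    (h : pvTableGet T A B C D = some o) (v : Int × Int) (i j k l : Nat) :
    pvTableGet (pvSet4 T A B C D v) i j k l
      = if i = A ∧ j = B ∧ k = C ∧ l = D then some (some v) else pvTableGet T i j k l := by
  unfold pvTableGet at h
  obtain ⟨r, hr, h⟩ : ∃ r, T[A]? = some r ∧ (r[B]?.bind fun r2 => r2[C]?.bind fun r3 => r3[D]?) = some o := by
    cases hA : T[A]? with
    | none => rw [hA] at h; simp at h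
    | some r => exact ⟨r, rfl, by rw [hA] at h; simpa using h⟩
  obtain ⟨r2, hr2, h⟩ : ∃ r2, r[B]? = some r2 ∧ (r2[C]?.bind fun r3 => r3[D]?) = some o := by
    cases hB : r[B]? with
    | none => rw [hB] at h; simp at h
    | some r2 => exact ⟨r2, rfl, by rw [hB] at h; simpa using h⟩
  obtain ⟨r3, hr3, h⟩ : ∃ r3, r2[C]? = some r3 ∧ r3[D]? = some o := by
    cases hC : r2[C]? with
    | none => rw [hC] at h; simp at h
    | some r3 => exact ⟨r3, rfl, by rw [hC] at h; simpa using h⟩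
  have hD : D < r3.length := by
    by_contra hge
    rw [List.getElem?_eq_none (by omega)] at h
    simp at h
  unfold pvSet4 pvTableGet
  simp only [pvModify_natCast, PySem.List.pySetD_natCast]
  rw [pvModify_getElem?]
  by_cases hi : A = i
  · subst hi
    rw [if_pos rfl, hr]
    simp only [Option.map_eq_map, Option.map_some, Option.bind_some]
    rw [pvModify_getElem?]
    by_cases hj : B = j
    · subst hj
      rw [if_pos rfl, hr2]
      simp only [Option.map_eq_map, Option.map_some, Option.bind_some]
      rw [pvModify_getElem?]
      by_cases hk : C = k
      · subst hk
        rw [if_pos rfl, hr3]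
        simp only [Option.map_eq_map, Option.map_some, Option.bind_some]
        rw [List.getElem?_set]
        by_cases hl : D = l
        · subst hl
          simp [hD]
        · simp [hl, Ne.symm hl]
      · simp [hk, Ne.symm hk]
    · simp [hj, Ne.symm hj]
  · simp [hi, Ne.symm hi]

theorem pvGood_of_fresh {T : List (List (List (List (Option (Int × Int)))))}
    (h : pvFresh T = true) : pvGood T := by
  intro i j k l hi hj hk hl
  simp only [pvFresh, List.all_eq_true, List.mem_range, beq_iff_eq] at h
  exact ⟨none, h i hi j hj k hk l hl, Or.inl rfl⟩

theorem pvRecMain : ∀ n : Nat, ∀ s1 s2 q1 q2 : Int,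
    ∀ T : List (List (List (List (Option (Int × Int))))),
    (42 - s1 - s2).toNat ≤ n → 0 ≤ s1 → 0 ≤ s2 →
    0 ≤ q1 → q1 < 10 → 0 ≤ q2 → q2 < 10 → pvGood T →
    (quantumAlgoRec s1 s2 q1 q2 T).1 = fSpec s1 s2 q1 q2 ∧
      pvGood (quantumAlgoRec s1 s2 q1 q2 T).2 := by
  intro n
  induction n with
  | zero =>
    intro s1 s2 q1 q2 T hn hs1 hs2 hq1 hq1' hq2 hq2' hG
    have : 21 ≤ s1 ∨ (¬ 21 ≤ s1 ∧ 21 ≤ s2) := by omega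
    rw [quantumAlgoRec, fSpec]
    rcases this with h | ⟨h1, h2⟩
    · rw [dif_pos h, dif_pos h]; exact ⟨rfl, hG⟩
    · rw [dif_neg h1, dif_neg h1, dif_pos h2, dif_pos h2]; exact ⟨rfl, hG⟩
  | succ n ih =>
    intro s1 s2 q1 q2 T hn hs1 hs2 hq1 hq1' hq2 hq2' hG
    rw [quantumAlgoRec, fSpec]
    by_cases h1 : 21 ≤ s1
    · rw [dif_pos h1, dif_pos h1]; exact ⟨rfl, hG⟩
    rw [dif_neg h1, dif_neg h1]
    by_cases h2 : 21 ≤ s2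
    · rw [dif_pos h2, dif_pos h2]; exact ⟨rfl, hG⟩
    rw [dif_neg h2, dif_neg h2]
    obtain ⟨o, hget, ho⟩ := hG s1.toNat s2.toNat q1.toNat q2.toNat
      (by omega) (by omega) (by omega) (by omega)
    have hlk : pvLookup4 T s1 s2 q1 q2 = some o := by
      rw [pvLookup4_eq T hs1 hs2 hq1 hq2]; exact hget
    -- the loop lemma: running the 'for' over any move list matches fGo and keeps the table good
    have hgo : ∀ moves : List (Int × Int), ∀ acc : Int × Int,
        ∀ T' : List (List (List (List (Option (Int × Int))))), pvGood T' →
        (quantumAlgoGo s1 s2 q1 q2 ⟨by omega, by omega⟩ moves acc T').1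
            = fGo s1 s2 q1 q2 ⟨by omega, by omega⟩ moves acc ∧
          pvGood (quantumAlgoGo s1 s2 q1 q2 ⟨by omega, by omega⟩ moves acc T').2 := by
      intro moves
      induction moves with
      | nil => intro acc T' hG'; rw [quantumAlgoGo, fGo]; exact ⟨rfl, hG'⟩
      | cons m rest ihm =>
        intro acc T' hG'
        rw [quantumAlgoGo, fGo]
        have hpos := pvMod10_bounds (q1 + m.1)
        have hx := ih s2 (s1 + PySem.Int.mod (q1 + m.1) 10 + 1) q2 (PySem.Int.mod (q1 + m.1) 10)
          T' (by omega) (by omega) (by omega) (by omega) (by omega) (by omega) (by omega) hG'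
        rw [hx.1]
        exact ihm _ _ hx.2
    rcases ho with ho | ho
    · -- fresh entry: the loop runs; afterwards the computed value is memoised
      subst ho
      rw [hlk]
      have hrun := hgo pvMoves (0, 0) T hG
      refine ⟨hrun.1, ?_⟩
      intro i j k l hi hj hk hl
      obtain ⟨o', hget', ho'⟩ :=
        hrun.2 s1.toNat s2.toNat q1.toNat q2.toNat (by omega) (by omega) (by omega) (by omega)
      have hs1' : ((s1.toNat : Nat) : Int) = s1 := Int.toNat_of_nonneg hs1
      have hs2' : ((s2.toNat : Nat) : Int) = s2 := Int.toNat_of_nonneg hs2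
      have hq1'' : ((q1.toNat : Nat) : Int) = q1 := Int.toNat_of_nonneg hq1
      have hq2'' : ((q2.toNat : Nat) : Int) = q2 := Int.toNat_of_nonneg hq2
      have hset := pvTableGet_pvSet4 hget'
        ((quantumAlgoGo s1 s2 q1 q2 ⟨by omega, by omega⟩ pvMoves (0, 0) T).1) i j k l
      rw [hs1', hs2', hq1'', hq2''] at hset
      rw [hset]
      by_cases heq : i = s1.toNat ∧ j = s2.toNat ∧ k = q1.toNat ∧ l = q2.toNat
      · rw [if_pos heq]
        refine ⟨_, rfl, Or.inr ?_⟩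
        obtain ⟨e1, e2, e3, e4⟩ := heq
        subst e1; subst e2; subst e3; subst e4
        rw [hs1', hs2', hq1'', hq2'']
        rw [hrun.1]
        rw [fSpec, dif_neg h1, dif_neg h2]
      · rw [if_neg heq]
        exact hrun.2 i j k l hi hj hk hl
    · -- memo hit: the cached value is the spec value
      subst ho
      rw [hlk]
      refine ⟨?_, hG⟩
      have hc : fSpec ((s1.toNat : Nat) : Int) ((s2.toNat : Nat) : Int) ((q1.toNat : Nat) : Int)
          ((q2.toNat : Nat) : Int) = fSpec s1 s2 q1 q2 := by
        rw [Int.toNat_of_nonneg hs1, Int.toNat_of_nonneg hs2,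
          Int.toNat_of_nonneg hq1, Int.toNat_of_nonneg hq2]
      rw [hc, fSpec, dif_neg h1, dif_neg h2]

-- ---------- B-side: the bottom-up table agrees with fSpec ----------

def pvBInner (W : PySem.Dict (Int × Int × Int × Int) (Int × Int)) (s2 s1 q1 q2 : Int) : Int × Int :=
  pvMoves.foldl (fun (w : Int × Int) m =>
    let pos := PySem.Int.mod (q1 + m.1) 10
    let sc := s1 + pos + 1
    if 21 ≤ sc then (w.1 + m.2, w.2)
    else
      let x := (W.get? (s2, sc, q2, pos)).getD (0, 0)
      (w.1 + x.2 * m.2, w.2 + x.1 * m.2)) (0, 0)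

def pvBQ2 (s1 s2 q1 : Int) (W : PySem.Dict (Int × Int × Int × Int) (Int × Int)) :
    PySem.Dict (Int × Int × Int × Int) (Int × Int) :=
  (PySem.List.pyRange 0 10 1).foldl (fun W q2 => W.insert (s1, s2, q1, q2) (pvBInner W s2 s1 q1 q2)) W

def pvBQ1 (s1 s2 : Int) (W : PySem.Dict (Int × Int × Int × Int) (Int × Int)) :
    PySem.Dict (Int × Int × Int × Int) (Int × Int) :=
  (PySem.List.pyRange 0 10 1).foldl (fun W q1 => pvBQ2 s1 s2 q1 W) W

def pvBS1 (total : Int) (W : PySem.Dict (Int × Int × Int × Int) (Int × Int)) :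
    PySem.Dict (Int × Int × Int × Int) (Int × Int) :=
  (PySem.List.pyRange (max 0 (total - 20)) (min total 20 + 1) 1).foldl
    (fun W s1 => pvBQ1 s1 (total - s1) W) W

def pvBAll : PySem.Dict (Int × Int × Int × Int) (Int × Int) :=
  (PySem.List.pyRange 40 (-1) (-1)).foldl (fun W total => pvBS1 total W) PySem.Dict.empty

theorem pvAlt_eq (p1score p2score p1pos p2pos : Int)
    (memoised : List (List (List (List (Option (Int × Int)))))) :
    quantumAlgo_alt p1score p2score p1pos p2pos memoised
      = if 21 ≤ p1score then (1, 0)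
        else if 21 ≤ p2score then (0, 1)
        else (pvBAll.get? (p1score, p2score, p1pos, p2pos)).getD (0, 0) := rfl

-- invariant: all in-range states with score total ≥ t are tabulated with their fSpec value
def pvJ (t : Int) (W : PySem.Dict (Int × Int × Int × Int) (Int × Int)) : Prop :=
  ∀ s1 s2 q1 q2 : Int, 0 ≤ s1 → s1 < 21 → 0 ≤ s2 → s2 < 21 →
    0 ≤ q1 → q1 < 10 → 0 ≤ q2 → q2 < 10 → t ≤ s1 + s2 →
    W.get? (s1, s2, q1, q2) = some (fSpec s1 s2 q1 q2)

theorem pvBInner_eq {W : PySem.Dict (Int × Int × Int × Int) (Int × Int)} {t s1 s2 q1 q2 : Int}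
    (hJ : pvJ (t + 1) W) (hs1 : 0 ≤ s1) (hs1' : s1 < 21) (hs2 : 0 ≤ s2) (hs2' : s2 < 21)
    (hq1 : 0 ≤ q1) (hq1' : q1 < 10) (hq2 : 0 ≤ q2) (hq2' : q2 < 10) (hsum : s1 + s2 = t) :
    pvBInner W s2 s1 q1 q2 = fSpec s1 s2 q1 q2 := by
  clear hq1 hq1'
  rw [fSpec, dif_neg (by omega : ¬ 21 ≤ s1), dif_neg (by omega : ¬ 21 ≤ s2)]
  have key : ∀ (moves : List (Int × Int)) (acc : Int × Int),
      moves.foldl (fun (w : Int × Int) m =>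
        let pos := PySem.Int.mod (q1 + m.1) 10
        let sc := s1 + pos + 1
        if 21 ≤ sc then (w.1 + m.2, w.2)
        else
          let x := (W.get? (s2, sc, q2, pos)).getD (0, 0)
          (w.1 + x.2 * m.2, w.2 + x.1 * m.2)) acc
        = fGo s1 s2 q1 q2 ⟨by omega, by omega⟩ moves acc := by
    intro moves
    induction moves with
    | nil => intro acc; rw [fGo, List.foldl_nil]
    | cons m rest ihm =>
      intro acc
      rw [List.foldl_cons, fGo, ihm]
      dsimp only
      have hpos := pvMod10_bounds (q1 + m.1)
      by_cases hsc : 21 ≤ s1 + PySem.Int.mod (q1 + m.1) 10 + 1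
      · rw [if_pos hsc]
        have hx : fSpec s2 (s1 + PySem.Int.mod (q1 + m.1) 10 + 1) q2 (PySem.Int.mod (q1 + m.1) 10)
            = (0, 1) := by
          rw [fSpec, dif_neg (by omega : ¬ 21 ≤ s2), dif_pos hsc]
        rw [hx]
        norm_num
      · rw [if_neg hsc]
        have hget := hJ s2 (s1 + PySem.Int.mod (q1 + m.1) 10 + 1) q2 (PySem.Int.mod (q1 + m.1) 10)
          hs2 hs2' (by omega) (by omega) hq2 hq2' (by omega) (by omega) (by omega)
        rw [hget]
        rfl
  exact key pvMoves (0, 0)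

theorem pvBQ2_correct {t s1 s2 q1 : Int} {W : PySem.Dict (Int × Int × Int × Int) (Int × Int)}
    (hJ : pvJ (t + 1) W) (hs1 : 0 ≤ s1) (hs1' : s1 < 21) (hs2 : 0 ≤ s2) (hs2' : s2 < 21)
    (hq1 : 0 ≤ q1) (hq1' : q1 < 10) (hsum : s1 + s2 = t) :
    pvJ (t + 1) (pvBQ2 s1 s2 q1 W) ∧
      (∀ a b c d : Int, W.get? (a, b, c, d) = some (fSpec a b c d) →
        (pvBQ2 s1 s2 q1 W).get? (a, b, c, d) = some (fSpec a b c d)) ∧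
      (∀ q2 : Int, 0 ≤ q2 → q2 < 10 →
        (pvBQ2 s1 s2 q1 W).get? (s1, s2, q1, q2) = some (fSpec s1 s2 q1 q2)) := by
  have key : ∀ (L : List Int), (∀ x ∈ L, 0 ≤ x ∧ x < 10) →
      ∀ W : PySem.Dict (Int × Int × Int × Int) (Int × Int), pvJ (t + 1) W →
      pvJ (t + 1) (L.foldl (fun W q2 => W.insert (s1, s2, q1, q2) (pvBInner W s2 s1 q1 q2)) W) ∧
        (∀ a b c d : Int, W.get? (a, b, c, d) = some (fSpec a b c d) →
          (L.foldl (fun W q2 => W.insert (s1, s2, q1, q2) (pvBInner W s2 s1 q1 q2)) W).get?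
            (a, b, c, d) = some (fSpec a b c d)) ∧
        (∀ q2 ∈ L,
          (L.foldl (fun W q2 => W.insert (s1, s2, q1, q2) (pvBInner W s2 s1 q1 q2)) W).get?
            (s1, s2, q1, q2) = some (fSpec s1 s2 q1 q2)) := by
    intro L
    induction L with
    | nil => intro _ W hJW; exact ⟨hJW, fun a b c d h => h, by simp⟩
    | cons q2 rest ihL =>
      intro hL W hJW
      have hq2 := hL q2 (List.mem_cons_self ..)
      have hv : pvBInner W s2 s1 q1 q2 = fSpec s1 s2 q1 q2 :=
        pvBInner_eq hJW hs1 hs1' hs2 hs2' hq1 hq1' hq2.1 hq2.2 hsum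
      set W1 := W.insert (s1, s2, q1, q2) (pvBInner W s2 s1 q1 q2) with hW1
      have hJ1 : pvJ (t + 1) W1 := by
        intro a b c d ha ha' hb hb' hc hc' hd hd' hab
        rw [hW1, PySem.Dict.get?_insert]
        split_ifs with h
        · exfalso
          simp only [Prod.mk.injEq] at h
          omega
        · exact hJW a b c d ha ha' hb hb' hc hc' hd hd' hab
      have hpres1 : ∀ a b c d : Int, W.get? (a, b, c, d) = some (fSpec a b c d) →
          W1.get? (a, b, c, d) = some (fSpec a b c d) := by
        intro a b c d h
        rw [hW1, PySem.Dict.get?_insert]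
        split_ifs with he
        · rw [hv]
          simp only [Prod.mk.injEq] at he
          obtain ⟨e1, e2, e3, e4⟩ := he
          subst e1; subst e2; subst e3; subst e4
          exact h ▸ rfl
        · exact h
      obtain ⟨hJr, hpres2, hdone⟩ := ihL (fun x hx => hL x (List.mem_cons_of_mem _ hx)) W1 hJ1
      rw [List.foldl_cons]
      refine ⟨hJr, fun a b c d h => hpres2 a b c d (hpres1 a b c d h), ?_⟩
      intro q2' hq2'
      rcases List.mem_cons.mp hq2' with he | hm
      · subst he
        refine hpres2 _ _ _ _ ?_
        rw [hW1, PySem.Dict.get?_insert_self, hv]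
      · exact hdone q2' hm
  have h := key (PySem.List.pyRange 0 10 1)
    (fun x hx => by
      have := PySem.List.mem_pyRange_one.mp hx
      exact ⟨this.1, this.2⟩) W hJ
  exact ⟨h.1, h.2.1, fun q2 h0 h10 =>
    h.2.2 q2 (PySem.List.mem_pyRange_one.mpr ⟨h0, h10⟩)⟩

theorem pvBQ1_correct {t s1 s2 : Int} {W : PySem.Dict (Int × Int × Int × Int) (Int × Int)}
    (hJ : pvJ (t + 1) W) (hs1 : 0 ≤ s1) (hs1' : s1 < 21) (hs2 : 0 ≤ s2) (hs2' : s2 < 21)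
    (hsum : s1 + s2 = t) :
    pvJ (t + 1) (pvBQ1 s1 s2 W) ∧
      (∀ a b c d : Int, W.get? (a, b, c, d) = some (fSpec a b c d) →
        (pvBQ1 s1 s2 W).get? (a, b, c, d) = some (fSpec a b c d)) ∧
      (∀ q1 q2 : Int, 0 ≤ q1 → q1 < 10 → 0 ≤ q2 → q2 < 10 →
        (pvBQ1 s1 s2 W).get? (s1, s2, q1, q2) = some (fSpec s1 s2 q1 q2)) := by
  have key : ∀ (L : List Int), (∀ x ∈ L, 0 ≤ x ∧ x < 10) →
      ∀ W : PySem.Dict (Int × Int × Int × Int) (Int × Int), pvJ (t + 1) W →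
      pvJ (t + 1) (L.foldl (fun W q1 => pvBQ2 s1 s2 q1 W) W) ∧
        (∀ a b c d : Int, W.get? (a, b, c, d) = some (fSpec a b c d) →
          (L.foldl (fun W q1 => pvBQ2 s1 s2 q1 W) W).get? (a, b, c, d) = some (fSpec a b c d)) ∧
        (∀ q1 ∈ L, ∀ q2 : Int, 0 ≤ q2 → q2 < 10 →
          (L.foldl (fun W q1 => pvBQ2 s1 s2 q1 W) W).get? (s1, s2, q1, q2)
            = some (fSpec s1 s2 q1 q2)) := by
    intro L
    induction L with
    | nil => intro _ W hJW; exact ⟨hJW, fun a b c d h => h, by simp⟩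
    | cons q1 rest ihL =>
      intro hL W hJW
      have hq1 := hL q1 (List.mem_cons_self ..)
      obtain ⟨hJ1, hpres1, hdone1⟩ :=
        pvBQ2_correct hJW hs1 hs1' hs2 hs2' hq1.1 hq1.2 hsum
      obtain ⟨hJr, hpres2, hdone⟩ := ihL (fun x hx => hL x (List.mem_cons_of_mem _ hx)) _ hJ1
      rw [List.foldl_cons]
      refine ⟨hJr, fun a b c d h => hpres2 a b c d (hpres1 a b c d h), ?_⟩
      intro q1' hq1' q2 h0 h10
      rcases List.mem_cons.mp hq1' with he | hm
      · subst he
        exact hpres2 _ _ _ _ (hdone1 q2 h0 h10)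
      · exact hdone q1' hm q2 h0 h10
  have h := key (PySem.List.pyRange 0 10 1)
    (fun x hx => by
      have := PySem.List.mem_pyRange_one.mp hx
      exact ⟨this.1, this.2⟩) W hJ
  exact ⟨h.1, h.2.1, fun q1 q2 h0 h10 h0' h10' =>
    h.2.2 q1 (PySem.List.mem_pyRange_one.mpr ⟨h0, h10⟩) q2 h0' h10'⟩

theorem pvBS1_correct {t : Int} {W : PySem.Dict (Int × Int × Int × Int) (Int × Int)}
    (hJ : pvJ (t + 1) W) : pvJ t (pvBS1 t W) := by
  have key : ∀ (L : List Int), (∀ x ∈ L, 0 ≤ x ∧ x < 21 ∧ 0 ≤ t - x ∧ t - x < 21) →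
      ∀ W : PySem.Dict (Int × Int × Int × Int) (Int × Int), pvJ (t + 1) W →
      pvJ (t + 1) (L.foldl (fun W s1 => pvBQ1 s1 (t - s1) W) W) ∧
        (∀ a b c d : Int, W.get? (a, b, c, d) = some (fSpec a b c d) →
          (L.foldl (fun W s1 => pvBQ1 s1 (t - s1) W) W).get? (a, b, c, d)
            = some (fSpec a b c d)) ∧
        (∀ s1 ∈ L, ∀ q1 q2 : Int, 0 ≤ q1 → q1 < 10 → 0 ≤ q2 → q2 < 10 →
          (L.foldl (fun W s1 => pvBQ1 s1 (t - s1) W) W).get? (s1, t - s1, q1, q2)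
            = some (fSpec s1 (t - s1) q1 q2)) := by
    intro L
    induction L with
    | nil => intro _ W hJW; exact ⟨hJW, fun a b c d h => h, by simp⟩
    | cons s1 rest ihL =>
      intro hL W hJW
      have hs1 := hL s1 (List.mem_cons_self ..)
      obtain ⟨hJ1, hpres1, hdone1⟩ :=
        pvBQ1_correct hJW hs1.1 hs1.2.1 hs1.2.2.1 hs1.2.2.2 (by ring)
      obtain ⟨hJr, hpres2, hdone⟩ := ihL (fun x hx => hL x (List.mem_cons_of_mem _ hx)) _ hJ1
      rw [List.foldl_cons]
      refine ⟨hJr, fun a b c d h => hpres2 a b c d (hpres1 a b c d h), ?_⟩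
      intro s1' hs1' q1 q2 hq1 hq1' hq2 hq2'
      rcases List.mem_cons.mp hs1' with he | hm
      · subst he
        exact hpres2 _ _ _ _ (hdone1 q1 q2 hq1 hq1' hq2 hq2')
      · exact hdone s1' hm q1 q2 hq1 hq1' hq2 hq2'
  have h := key (PySem.List.pyRange (max 0 (t - 20)) (min t 20 + 1) 1)
    (fun x hx => by
      have := PySem.List.mem_pyRange_one.mp hx
      refine ⟨by omega, by omega, by omega, by omega⟩) W hJ
  intro a b c d ha ha' hb hb' hc hc' hd hd' hab
  by_cases hgt : t + 1 ≤ a + b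
  · exact h.1 a b c d ha ha' hb hb' hc hc' hd hd' hgt
  · have hmem : a ∈ PySem.List.pyRange (max 0 (t - 20)) (min t 20 + 1) 1 :=
      PySem.List.mem_pyRange_one.mpr ⟨by omega, by omega⟩
    have hdone := h.2.2 a hmem c d hc hc' hd hd'
    have hbe : b = t - a := by omega
    rw [hbe]
    exact hdone

theorem pvBAll_correct : pvJ 0 pvBAll := by
  have outer : ∀ n : Nat, ∀ t : Int, t = 41 - (n : Int) → 0 ≤ t →
      pvJ t ((PySem.List.pyRange 40 (t - 1) (-1)).foldl (fun W total => pvBS1 total W)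
        PySem.Dict.empty) := by
    intro n
    induction n with
    | zero =>
      intro t ht _
      have h41 : t = 41 := by omega
      subst h41
      rw [PySem.List.pyRange_neg_one_eq_nil (by omega)]
      intro a b c d _ ha' _ hb' _ _ _ _ hab
      omega
    | succ n ihn =>
      intro t ht ht0
      have hsplit : PySem.List.pyRange 40 (t - 1) (-1)
          = PySem.List.pyRange 40 t (-1) ++ [t] := by
        rw [PySem.List.pyRange_neg_one_eq_reverse, PySem.List.pyRange_neg_one_eq_reverse]
        have he : t - 1 + 1 = t := by ring
        rw [he, PySem.List.pyRange_one_cons (by omega : t < 40 + 1)]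
        simp
      rw [hsplit, List.foldl_append]
      simp only [List.foldl_cons, List.foldl_nil]
      have hprev := ihn (t + 1) (by push_cast at ht ⊢; omega) (by omega)
      have he : t + 1 - 1 = t := by ring
      rw [he] at hprev
      exact pvBS1_correct hprev
  have h := outer 41 0 (by norm_num) le_rfl
  have he : (0 : Int) - 1 = -1 := by norm_num
  rw [he] at h
  exact h

-- ===== VERDICT (by name: the statement is the Claim_ definition above) =====
theorem quantumAlgo_spec : Claim_equal_quantumAlgo := by
  unfold Claim_equal_quantumAlgo Spec_quantumAlgo
  intro p1score p2score p1pos p2pos memoised _ hPre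
  rw [pvAlt_eq]
  rcases hPre with h | ⟨h1, h2⟩ | ⟨hs1, hs1', hs2, hs2', hq1, hq1', hq2, hq2', hF⟩
  · rw [if_pos h]
    unfold quantumAlgo
    rw [quantumAlgoRec, dif_pos h]
  · rw [if_neg (by omega), if_pos h2]
    unfold quantumAlgo
    rw [quantumAlgoRec, dif_neg (by omega), dif_pos h2]
  · rw [if_neg (by omega), if_neg (by omega)]
    have hA := (pvRecMain (42 - p1score - p2score).toNat p1score p2score p1pos p2pos memoised
      le_rfl hs1 hs2 hq1 hq1' hq2 hq2' (pvGood_of_fresh hF)).1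
    unfold quantumAlgo
    rw [hA]
    have hB := pvBAll_correct p1score p2score p1pos p2pos hs1 hs1' hs2 hs2' hq1 hq1' hq2 hq2'
      (by omega)
    rw [hB]
    rfl
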